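-- pv_equiv track=rewrite | github.com/iamjuli0/programas-UFAM | 1° periodo/IC/bloco4.py | m_mais_ponto
-- ===== SOURCE A (Python) =====
-- def head(xs):
-- 	return xs[0]
--
-- def tail(xs):
-- 	return [x for x in xs][1:]
--
-- def ponta_que_entra(pedra, ponta):
--     if pedra[0] == ponta[0] and pedra[0] != pedra[1]:
--         return [pedra[1]]
--     elif pedra[0] == ponta[0] and pedra[0] == pedra[1]:
--         return [pedra[0], pedra[1]]
--     else:
--         return [pedra[0]]
--
-- def joga_pedra(pedra, mesa, index):
--
--     valores_anteriores = mesa[:index]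
--     if len(mesa) != index + 1:
--         valores_posteriores = mesa[(index + 1) :]
--     else:
--         valores_posteriores = ()
--
--     return (
--         valores_anteriores
--         + (ponta_que_entra(pedra, mesa[index]),)
--         + valores_posteriores
--     )
--
-- def suma(values):
--     if len(values) == 0:
--         return 0
--
--     return head(values) + suma(tail(values))
--
-- def sum_pontas(pontas):
--     if len(pontas) == 0:
--         return 0
--     return suma(pontas[0]) + sum_pontas(pontas[1:])
--
-- def m_mais_ponto(pedra, mesa):
--
--     indexs = find_indexs(pedra[0], mesa) + find_indexs(pedra[1], mesa)
--
--     maior_ponto = 0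
--     maior_ponto_index = 0
--
--     for inx in indexs:
--         if maior_ponto <= sum_pontas(joga_pedra(pedra, mesa, inx)):
--             maior_ponto = sum_pontas(joga_pedra(pedra, mesa, inx))
--             maior_ponto_index = inx
--
--     return (maior_ponto, maior_ponto_index)
--
-- def find_indexs(lado_a, mesa):
--     indece = []
--     for ind in range(0, len(mesa)):
--         if len(mesa[ind]) != 0 and lado_a == mesa[ind][0]:
--             indece.append(ind)
--     return indece
-- ===== SOURCE B (Python) =====
-- def m_mais_ponto(pedra, mesa):
--     # Single pass per side with the table total precomputed once: each candidate's
--     # score is total - sum(old row) + sum(replacement row).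
--     def entra(row):
--         if pedra[0] == row[0] and pedra[0] != pedra[1]:
--             return [pedra[1]]
--         elif pedra[0] == row[0] and pedra[0] == pedra[1]:
--             return [pedra[0], pedra[1]]
--         else:
--             return [pedra[0]]
--     total = sum(sum(row) for row in mesa)
--     best, best_idx = 0, 0
--     for lado in (pedra[0], pedra[1]):
--         for i, row in enumerate(mesa):
--             if row and row[0] == lado:
--                 cand = total - sum(row) + sum(entra(row))
--                 if best <= cand:
--                     best, best_idx = cand, i
--     return (best, best_idx)
-- ===== Notes on version B (the rewrite author's own statement) =====
-- stated objective: faster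
-- what changed: B precomputes the table's total pip sum once and scores each candidate index in a single enumerate pass as total - sum(old row) + sum(replacement), instead of A's rebuilding the whole table with joga_pedra and recursively resumming every row (twice on accepted candidates) for each candidate index.
import Mathlib
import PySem

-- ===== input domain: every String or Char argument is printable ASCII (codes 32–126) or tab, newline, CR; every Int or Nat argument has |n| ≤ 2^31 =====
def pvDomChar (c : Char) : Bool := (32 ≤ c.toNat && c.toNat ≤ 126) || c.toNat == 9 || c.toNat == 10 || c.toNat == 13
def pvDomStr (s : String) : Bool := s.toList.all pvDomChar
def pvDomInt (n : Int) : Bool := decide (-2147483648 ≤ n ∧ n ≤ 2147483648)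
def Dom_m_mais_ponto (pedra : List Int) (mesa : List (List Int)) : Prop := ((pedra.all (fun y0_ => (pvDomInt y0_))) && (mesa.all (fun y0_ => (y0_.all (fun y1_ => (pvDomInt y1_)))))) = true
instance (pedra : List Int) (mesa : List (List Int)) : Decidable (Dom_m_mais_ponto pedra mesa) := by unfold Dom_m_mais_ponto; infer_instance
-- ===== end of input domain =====

-- ===== PORT A =====
-- B precomputes the table's total pip sum once and scores each candidate by adjusting
-- only the replaced slot, instead of A's rebuild-the-table-and-resum per candidate.

def ponta_que_entra (pedra ponta : List Int) : List Int :=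
  -- pedra[0]/pedra[1]: in range under Pre_; ponta[0] is read only through getD (ponta is
  -- nonempty whenever joga_pedra is reached, by find_indexs's guard)
  if pedra.getD 0 0 = ponta.getD 0 0 ∧ pedra.getD 0 0 ≠ pedra.getD 1 0 then [pedra.getD 1 0]
  else if pedra.getD 0 0 = ponta.getD 0 0 ∧ pedra.getD 0 0 = pedra.getD 1 0 then
    [pedra.getD 0 0, pedra.getD 1 0]
  else [pedra.getD 0 0]

def joga_pedra (pedra : List Int) (mesa : List (List Int)) (index : Nat) : List (List Int) :=
  let valores_anteriores := mesa.take index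
  let valores_posteriores := if mesa.length ≠ index + 1 then mesa.drop (index + 1) else []
  valores_anteriores ++ [ponta_que_entra pedra (mesa.getD index [])] ++ valores_posteriores

def suma : List Int → Int
  | [] => 0
  | x :: xs => x + suma xs          -- head(values) + suma(tail(values))

def sum_pontas : List (List Int) → Int
  | [] => 0
  | p :: ps => suma p + sum_pontas ps

def find_indexs (lado_a : Int) (mesa : List (List Int)) : List Nat :=
  (List.range mesa.length).foldl
    (fun indece ind =>
      if (mesa.getD ind []).length ≠ 0 ∧ lado_a = (mesa.getD ind []).getD 0 0 then
        indece ++ [ind]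
      else indece) []

def m_mais_ponto (pedra : List Int) (mesa : List (List Int)) : List Int :=
  let indexs := find_indexs (pedra.getD 0 0) mesa ++ find_indexs (pedra.getD 1 0) mesa
  let r := indexs.foldl
    (fun (st : Int × Int) inx =>
      if st.1 ≤ sum_pontas (joga_pedra pedra mesa inx) then
        (sum_pontas (joga_pedra pedra mesa inx), (inx : Int))
      else st) (0, 0)
  [r.1, r.2]

-- ===== PORT B =====
def altEntra (pedra row : List Int) : List Int :=
  if pedra.getD 0 0 = row.getD 0 0 ∧ pedra.getD 0 0 ≠ pedra.getD 1 0 then [pedra.getD 1 0]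
  else if pedra.getD 0 0 = row.getD 0 0 ∧ pedra.getD 0 0 = pedra.getD 1 0 then
    [pedra.getD 0 0, pedra.getD 1 0]
  else [pedra.getD 0 0]

def m_mais_ponto_alt (pedra : List Int) (mesa : List (List Int)) : List Int :=
  let total := (mesa.map List.sum).sum
  let r := [pedra.getD 0 0, pedra.getD 1 0].foldl
    (fun st lado =>
      (PySem.List.enumerate mesa).foldl
        (fun (st : Int × Int) p =>
          if p.2.length ≠ 0 ∧ p.2.getD 0 0 = lado then
            let cand := total - p.2.sum + (altEntra pedra p.2).sum
            if st.1 ≤ cand then (cand, p.1) else st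
          else st) st) ((0 : Int), (0 : Int))
  [r.1, r.2]

-- ===== PRECONDITION & SPEC =====
-- Pre_ excludes only len(pedra) < 2, where Python A raises IndexError on pedra[0]/pedra[1]
-- (B raises there too).
def Pre_m_mais_ponto (pedra : List Int) (mesa : List (List Int)) : Prop :=
  2 ≤ pedra.length
instance (pedra : List Int) (mesa : List (List Int)) : Decidable (Pre_m_mais_ponto pedra mesa) := by
  unfold Pre_m_mais_ponto; infer_instance

def pvWitness_m_mais_ponto : List Int × List (List Int) := ([2, 3], [[2, 5], [], [4]])

def Spec_m_mais_ponto (pedra : List Int) (mesa : List (List Int)) (out : List Int) : Prop := out = m_mais_ponto_alt pedra mesa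
instance (pedra : List Int) (mesa : List (List Int)) (out : List Int) : Decidable (Spec_m_mais_ponto pedra mesa out) := by unfold Spec_m_mais_ponto; infer_instance

-- ===== CLAIM (what is proved, stated in full; the proofs are below) =====
def Claim_equal_m_mais_ponto : Prop := ∀ (pedra : List Int) (mesa : List (List Int)), Dom_m_mais_ponto pedra mesa → Pre_m_mais_ponto pedra mesa → Spec_m_mais_ponto pedra mesa (m_mais_ponto pedra mesa)

-- ===== LEMMAS AND PROOFS =====

theorem suma_eq (l : List Int) : suma l = l.sum := by
  induction l with
  | nil => rfl
  | cons x xs ih => simp [suma, ih]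

theorem sum_pontas_eq (l : List (List Int)) : sum_pontas l = (l.map List.sum).sum := by
  induction l with
  | nil => rfl
  | cons p ps ih => simp [sum_pontas, suma_eq, ih]

theorem entra_eq : ponta_que_entra = altEntra := rfl

-- the two branches of joga_pedra coincide when index is in range
theorem joga_pedra_in_range (pedra : List Int) (mesa : List (List Int)) (k : Nat) :
    joga_pedra pedra mesa k =
      mesa.take k ++ [ponta_que_entra pedra (mesa.getD k [])] ++ mesa.drop (k + 1) := by
  unfold joga_pedra
  by_cases h : mesa.length = k + 1
  · simp [h, List.drop_eq_nil_of_le (by omega : mesa.length ≤ k + 1)]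
  · simp [h]

-- A's score of candidate k equals B's "total adjusted at slot k"
theorem cand_eq (pedra : List Int) (mesa : List (List Int)) (k : Nat) (hk : k < mesa.length) :
    sum_pontas (joga_pedra pedra mesa k) =
      (mesa.map List.sum).sum - (mesa.getD k []).sum + (altEntra pedra (mesa.getD k [])).sum := by
  rw [joga_pedra_in_range pedra mesa k, sum_pontas_eq, entra_eq]
  have hsplit : mesa = mesa.take k ++ mesa.getD k [] :: mesa.drop (k + 1) := by
    conv_lhs => rw [← List.take_append_drop k mesa, List.drop_eq_getElem_cons hk]
    rw [List.getD_eq_getElem mesa [] hk]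
  have htot : (mesa.map List.sum).sum
      = ((mesa.take k).map List.sum).sum + (mesa.getD k []).sum
        + ((mesa.drop (k + 1)).map List.sum).sum := by
    conv_lhs => rw [hsplit]
    simp [List.map_append, List.sum_append]
    ring
  rw [htot]
  simp [List.map_append, List.sum_append]
  ring

-- one scan of B (one value of `lado`, over enumerate) equals one fold of A
-- (over find_indexs lado), from any start state
theorem side_eq (pedra : List Int) (mesa : List (List Int)) (lado : Int) (st : Int × Int) :
    (find_indexs lado mesa).foldl
      (fun (st : Int × Int) inx =>
        if st.1 ≤ sum_pontas (joga_pedra pedra mesa inx) then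
          (sum_pontas (joga_pedra pedra mesa inx), (inx : Int))
        else st) st =
    (PySem.List.enumerate mesa).foldl
      (fun (st : Int × Int) p =>
        if p.2.length ≠ 0 ∧ p.2.getD 0 0 = lado then
          if st.1 ≤ (mesa.map List.sum).sum - p.2.sum + (altEntra pedra p.2).sum then
            ((mesa.map List.sum).sum - p.2.sum + (altEntra pedra p.2).sum, p.1)
          else st
        else st) st := by
  rw [PySem.List.enumerate_eq_map_pyRange mesa [], List.foldl_map]
  rw [show PySem.List.len mesa = ((mesa.length : Nat) : Int) from rfl,
      PySem.List.pyRange_zero_natCast, List.foldl_map]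
  simp only [PySem.List.pyGetD_natCast]
  rw [PySem.List.foldl_ite_eq_foldl_filter
        (fun k : Nat => (mesa.getD k []).length ≠ 0 ∧ (mesa.getD k []).getD 0 0 = lado)]
  unfold find_indexs
  rw [PySem.List.foldl_append_ite_eq_filter
        (fun ind : Nat => (mesa.getD ind []).length ≠ 0 ∧ lado = (mesa.getD ind []).getD 0 0)]
  rw [List.nil_append]
  rw [List.filter_congr (fun x _ =>
        decide_eq_decide.mpr (and_congr_right fun _ => eq_comm))]
  apply PySem.List.foldl_congr_mem
  intro acc k hmem
  have hk : k < mesa.length := List.mem_range.mp (List.mem_of_mem_filter hmem)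
  rw [cand_eq pedra mesa k hk]

-- ===== VERDICT (by name: the statement is the Claim_ definition above) =====
theorem m_mais_ponto_spec : Claim_equal_m_mais_ponto := by
  intro pedra mesa _ _
  unfold Spec_m_mais_ponto m_mais_ponto m_mais_ponto_alt
  dsimp only
  simp only [List.foldl_append, List.foldl_cons, List.foldl_nil]
  rw [side_eq pedra mesa (pedra.getD 0 0) (0, 0),
      side_eq pedra mesa (pedra.getD 1 0)]
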